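-- pv_equiv track=rewrite | github.com/Sethusnair/promptAi | promptgen/core/views.py | get_smart_questions
-- ===== SOURCE A (Python) =====
-- def get_smart_questions(user_input):
--
--     text = user_input.lower()
--
--     # 🌍 TRAVEL / TRIP
--     if any(k in text for k in ["trip", "travel", "vacation", "tour"]):
--         return [
--             "Where do you want to go?",
--             "What is your budget?",
--             "How many days will the trip be?"
--         ]
--
--     # 📄 RESUME / CV
--     elif any(k in text for k in ["resume", "cv", "job", "portfolio"]):
--         return [
--             "What is your profession or role?",
--             "How many years of experience do you have?",
--             "What are your key skills or achievements?"
--         ]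
--
--     # 💻 CODE / PROGRAMMING
--     elif any(k in text for k in ["code", "program", "api", "backend", "frontend", "app"]):
--         return [
--             "What technology or language should be used?",
--             "What is the main functionality?",
--             "Any specific requirements or constraints?"
--         ]
--
--     # ✍️ CONTENT / WRITING
--     elif any(k in text for k in ["blog", "article", "post", "content", "story"]):
--         return [
--             "What is the topic?",
--             "Who is the target audience?",
--             "What tone or style do you prefer?"
--         ]
--
--     # 📊 BUSINESS / PLAN
--     elif any(k in text for k in ["business", "plan", "startup", "idea"]):
--         return [
--             "What is the business idea?",
--             "Who is the target market?",
--             "What is the main goal or outcome?"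
--         ]
--
--     # 📚 STUDY / LEARNING
--     elif any(k in text for k in ["study", "learn", "course", "roadmap"]):
--         return [
--             "What do you want to learn?",
--             "What is your current level?",
--             "What is your goal or timeline?"
--         ]
--
--     # 🎨 DESIGN
--     elif any(k in text for k in ["design", "ui", "ux", "logo"]):
--         return [
--             "What type of design do you need?",
--             "What style or theme do you prefer?",
--             "Any specific colors or requirements?"
--         ]
--
--     # 🔧 DEFAULT
--     else:
--         return [
--             "What is your goal?",
--             "Who is this for?",
--             "Any specific requirements?"
--         ]
-- ===== SOURCE B (Python) =====
-- # Single forward scan: at each position try to match a keyword (keyword -> category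
-- # dict); keep the minimum category index matched; index into the table of question sets.
-- KEYMAP = {
--     "trip": 0, "travel": 0, "vacation": 0, "tour": 0,
--     "resume": 1, "cv": 1, "job": 1, "portfolio": 1,
--     "code": 2, "program": 2, "api": 2, "backend": 2, "frontend": 2, "app": 2,
--     "blog": 3, "article": 3, "post": 3, "content": 3, "story": 3,
--     "business": 4, "plan": 4, "startup": 4, "idea": 4,
--     "study": 5, "learn": 5, "course": 5, "roadmap": 5,
--     "design": 6, "ui": 6, "ux": 6, "logo": 6,
-- }
--
-- QUESTION_SETS = [
--     ["Where do you want to go?",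
--      "What is your budget?",
--      "How many days will the trip be?"],
--     ["What is your profession or role?",
--      "How many years of experience do you have?",
--      "What are your key skills or achievements?"],
--     ["What technology or language should be used?",
--      "What is the main functionality?",
--      "Any specific requirements or constraints?"],
--     ["What is the topic?",
--      "Who is the target audience?",
--      "What tone or style do you prefer?"],
--     ["What is the business idea?",
--      "Who is the target market?",
--      "What is the main goal or outcome?"],
--     ["What do you want to learn?",
--      "What is your current level?",
--      "What is your goal or timeline?"],
--     ["What type of design do you need?",
--      "What style or theme do you prefer?",
--      "Any specific colors or requirements?"],
--     ["What is your goal?",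
--      "Who is this for?",
--      "Any specific requirements?"],
-- ]
--
--
-- def get_smart_questions(user_input):
--     text = user_input.lower()
--     best = 7
--     for i in range(len(text)):
--         for kw, cat in KEYMAP.items():
--             if cat < best and text.startswith(kw, i):
--                 best = cat
--     return QUESTION_SETS[best]
-- ===== Notes on version B (the rewrite author's own statement) =====
-- stated objective: alternative
-- what changed: Replaced the eight-way if/elif chain of whole-string substring-membership tests with a single forward scan over text positions that prefix-matches keywords from a keyword-to-category dictionary and keeps the minimum category index, then indexes a table of question sets.
import Mathlib
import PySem

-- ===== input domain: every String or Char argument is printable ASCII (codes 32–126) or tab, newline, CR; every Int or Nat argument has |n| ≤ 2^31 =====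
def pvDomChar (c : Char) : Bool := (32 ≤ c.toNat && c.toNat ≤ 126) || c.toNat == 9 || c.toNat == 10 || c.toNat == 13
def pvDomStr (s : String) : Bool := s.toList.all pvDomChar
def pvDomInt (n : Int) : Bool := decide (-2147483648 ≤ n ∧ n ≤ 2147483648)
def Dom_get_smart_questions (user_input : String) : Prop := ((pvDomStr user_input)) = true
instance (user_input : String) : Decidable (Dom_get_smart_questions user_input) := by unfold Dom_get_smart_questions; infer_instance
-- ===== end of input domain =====

-- B replaces A's eight-way if/elif chain of substring-membership tests with a single
-- forward scan over text positions that prefix-matches a keyword->category dictionary,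
-- keeping the minimum category index, then indexes a table of question sets (alternative).


-- ===== PORT A =====
-- literal transliteration of A: lower the input, then the if/elif chain in source order
def get_smart_questions (user_input : String) : List String :=
  let text := PySem.Str.lower user_input
  if ["trip", "travel", "vacation", "tour"].any (fun k => PySem.Str.isIn k text) then
    ["Where do you want to go?",
     "What is your budget?",
     "How many days will the trip be?"]
  else if ["resume", "cv", "job", "portfolio"].any (fun k => PySem.Str.isIn k text) then
    ["What is your profession or role?",
     "How many years of experience do you have?",
     "What are your key skills or achievements?"]
  else if ["code", "program", "api", "backend", "frontend", "app"].any (fun k => PySem.Str.isIn k text) then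
    ["What technology or language should be used?",
     "What is the main functionality?",
     "Any specific requirements or constraints?"]
  else if ["blog", "article", "post", "content", "story"].any (fun k => PySem.Str.isIn k text) then
    ["What is the topic?",
     "Who is the target audience?",
     "What tone or style do you prefer?"]
  else if ["business", "plan", "startup", "idea"].any (fun k => PySem.Str.isIn k text) then
    ["What is the business idea?",
     "Who is the target market?",
     "What is the main goal or outcome?"]
  else if ["study", "learn", "course", "roadmap"].any (fun k => PySem.Str.isIn k text) then
    ["What do you want to learn?",
     "What is your current level?",
     "What is your goal or timeline?"]
  else if ["design", "ui", "ux", "logo"].any (fun k => PySem.Str.isIn k text) then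
    ["What type of design do you need?",
     "What style or theme do you prefer?",
     "Any specific colors or requirements?"]
  else
    ["What is your goal?",
     "Who is this for?",
     "Any specific requirements?"]

-- ===== PORT B =====
-- Source B's KEYMAP dict (keyword -> category index), insertion order; string keys ported
-- through .toList since B prefix-matches them against character positions of the text
def pvKeyMap : List (List Char × Int) :=
  [("trip".toList, 0), ("travel".toList, 0), ("vacation".toList, 0), ("tour".toList, 0),
   ("resume".toList, 1), ("cv".toList, 1), ("job".toList, 1), ("portfolio".toList, 1),
   ("code".toList, 2), ("program".toList, 2), ("api".toList, 2), ("backend".toList, 2),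
   ("frontend".toList, 2), ("app".toList, 2),
   ("blog".toList, 3), ("article".toList, 3), ("post".toList, 3), ("content".toList, 3),
   ("story".toList, 3),
   ("business".toList, 4), ("plan".toList, 4), ("startup".toList, 4), ("idea".toList, 4),
   ("study".toList, 5), ("learn".toList, 5), ("course".toList, 5), ("roadmap".toList, 5),
   ("design".toList, 6), ("ui".toList, 6), ("ux".toList, 6), ("logo".toList, 6)]

-- Source B's QUESTION_SETS table (index 7 = the default set)
def pvQuestionSets : List (List String) :=
  [["Where do you want to go?",
    "What is your budget?",
    "How many days will the trip be?"],
   ["What is your profession or role?",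
    "How many years of experience do you have?",
    "What are your key skills or achievements?"],
   ["What technology or language should be used?",
    "What is the main functionality?",
    "Any specific requirements or constraints?"],
   ["What is the topic?",
    "Who is the target audience?",
    "What tone or style do you prefer?"],
   ["What is the business idea?",
    "Who is the target market?",
    "What is the main goal or outcome?"],
   ["What do you want to learn?",
    "What is your current level?",
    "What is your goal or timeline?"],
   ["What type of design do you need?",
    "What style or theme do you prefer?",
    "Any specific colors or requirements?"],
   ["What is your goal?",
    "Who is this for?",
    "Any specific requirements?"]]

-- B: best = 7; for i in range(len(text)): for kw, cat in KEYMAP.items():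
--   if cat < best and text.startswith(kw, i): best = cat;  return QUESTION_SETS[best]
-- text.startswith(kw, i) has no PySem primitive; ported by hand as a prefix test on the
-- i-suffix — exact for the loop's indices 0 ≤ i < len(text)
def get_smart_questions_alt (user_input : String) : List String :=
  let cs := PySem.Chars.lower user_input.toList
  let best := (PySem.List.pyRange 0 (cs.length : Int) 1).foldl
    (fun b i => pvKeyMap.foldl
      (fun b p => if p.2 < b ∧ PySem.Chars.startswith (cs.drop i.toNat) p.1 then p.2 else b)
      b) 7
  PySem.List.pyGetD pvQuestionSets best []

-- ===== PRECONDITION & SPEC =====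
def Spec_get_smart_questions (user_input : String) (out : List String) : Prop := out = get_smart_questions_alt user_input
instance (user_input : String) (out : List String) : Decidable (Spec_get_smart_questions user_input out) := by unfold Spec_get_smart_questions; infer_instance

-- ===== CLAIM (what is proved, stated in full; the proofs are below) =====
def Claim_equal_get_smart_questions : Prop := ∀ (user_input : String), Dom_get_smart_questions user_input → Spec_get_smart_questions user_input (get_smart_questions user_input)

-- ===== LEMMAS AND PROOFS =====

-- running-minimum fold over (keyword, category) pairs
def pvMfold (l : List (List Char × Int)) (b : Int) : Int :=
  l.foldl (fun b p => min b p.2) b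

-- pairs whose keyword is an infix / a prefix of s
def pvIfil (s : List Char) (l : List (List Char × Int)) : List (List Char × Int) :=
  l.filter (fun p => decide (p.1 <:+: s))
def pvPfil (s : List Char) (l : List (List Char × Int)) : List (List Char × Int) :=
  l.filter (fun p => decide (p.1 <+: s))

theorem pvMfold_le (l : List (List Char × Int)) (b : Int) : pvMfold l b ≤ b := by
  induction l generalizing b with
  | nil => simp [pvMfold]
  | cons p t ih =>
      calc pvMfold (p :: t) b = pvMfold t (min b p.2) := rfl
        _ ≤ min b p.2 := ih _
        _ ≤ b := min_le_left _ _

theorem pvMfold_min (l : List (List Char × Int)) (a b : Int) :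
    pvMfold l (min a b) = min a (pvMfold l b) := by
  induction l generalizing b with
  | nil => simp [pvMfold]
  | cons p t ih =>
      show pvMfold t (min (min a b) p.2) = min a (pvMfold t (min b p.2))
      rw [min_assoc, ih]

theorem pvMfold_comm (l₁ l₂ : List (List Char × Int)) (b : Int) :
    pvMfold l₁ (pvMfold l₂ b) = pvMfold l₂ (pvMfold l₁ b) := by
  induction l₂ generalizing b with
  | nil => rfl
  | cons p t ih =>
      show pvMfold l₁ (pvMfold t (min b p.2)) = pvMfold t (min (pvMfold l₁ b) p.2)
      rw [min_comm b p.2, pvMfold_min t, pvMfold_min l₁, ih, ← pvMfold_min t, min_comm]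

-- the inner keyword loop is a running minimum over the prefix-matching pairs
theorem pvInner_eq (l : List (List Char × Int)) (s : List Char) (b : Int) :
    l.foldl (fun b p => if p.2 < b ∧ PySem.Chars.startswith s p.1 then p.2 else b) b
      = pvMfold (pvPfil s l) b := by
  induction l generalizing b with
  | nil => rfl
  | cons p t ih =>
      by_cases hs : p.1 <+: s
      · have hsw : PySem.Chars.startswith s p.1 = true := (PySem.Chars.startswith_iff s p.1).mpr hs
        have hstep : (if p.2 < b ∧ PySem.Chars.startswith s p.1 then p.2 else b) = min b p.2 := by
          simp only [hsw, and_true]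
          rw [min_def]; split_ifs <;> omega
        simp only [List.foldl_cons, hstep, ih, pvPfil, List.filter_cons, decide_eq_true hs]
        rfl
      · have hsw : PySem.Chars.startswith s p.1 = false := by
          rcases h : PySem.Chars.startswith s p.1 with _ | _
          · rfl
          · exact absurd ((PySem.Chars.startswith_iff s p.1).mp h) hs
        simp only [List.foldl_cons, hsw, Bool.false_eq_true, and_false, if_false, ih,
          pvPfil, List.filter_cons, decide_eq_false hs]

-- minimum over infix matches of c :: cs = prefix matches of c :: cs, then infix matches of cs
theorem pvUnion (c : Char) (cs : List Char) (l : List (List Char × Int)) (b : Int) :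
    pvMfold (pvIfil (c :: cs) l) b = pvMfold (pvPfil (c :: cs) l) (pvMfold (pvIfil cs l) b) := by
  induction l generalizing b with
  | nil => rfl
  | cons p t ih =>
      by_cases hq : p.1 <+: (c :: cs) <;> by_cases hr : p.1 <:+: cs
      · have hi : p.1 <:+: (c :: cs) := List.infix_cons_iff.mpr (Or.inl hq)
        simp only [pvIfil, pvPfil, List.filter_cons, decide_eq_true hi, decide_eq_true hq,
          decide_eq_true hr]
        show pvMfold (pvIfil (c :: cs) t) (min b p.2)
          = pvMfold (pvPfil (c :: cs) t) (min (pvMfold (pvIfil cs t) (min b p.2)) p.2)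
        have hle : pvMfold (pvIfil cs t) (min b p.2) ≤ p.2 :=
          le_trans (pvMfold_le _ _) (min_le_right _ _)
        rw [min_eq_left hle, ih]
      · have hi : p.1 <:+: (c :: cs) := List.infix_cons_iff.mpr (Or.inl hq)
        simp only [pvIfil, pvPfil, List.filter_cons, decide_eq_true hi, decide_eq_true hq,
          decide_eq_false hr]
        show pvMfold (pvIfil (c :: cs) t) (min b p.2)
          = pvMfold (pvPfil (c :: cs) t) (min (pvMfold (pvIfil cs t) b) p.2)
        rw [ih, min_comm b p.2, pvMfold_min, min_comm]
      · have hi : p.1 <:+: (c :: cs) := List.infix_cons_iff.mpr (Or.inr hr)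
        simp only [pvIfil, pvPfil, List.filter_cons, decide_eq_true hi, decide_eq_false hq,
          decide_eq_true hr]
        show pvMfold (pvIfil (c :: cs) t) (min b p.2)
          = pvMfold (pvPfil (c :: cs) t) (pvMfold (pvIfil cs t) (min b p.2))
        exact ih _
      · have hi : ¬ p.1 <:+: (c :: cs) := fun h => (List.infix_cons_iff.mp h).elim hq hr
        simp only [pvIfil, pvPfil, List.filter_cons, decide_eq_false hi, decide_eq_false hq,
          decide_eq_false hr]
        exact ih _

-- the position loop from index len - d onwards is a running minimum over infix matches of
-- the corresponding suffix
theorem pvLoop_eq (cs : List Char) :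
    ∀ (d : Nat), d ≤ cs.length → ∀ (b : Int),
      (PySem.List.pyRange ((cs.length : Int) - d) (cs.length : Int) 1).foldl
        (fun b i => pvKeyMap.foldl
          (fun b p => if p.2 < b ∧ PySem.Chars.startswith (cs.drop i.toNat) p.1 then p.2 else b)
          b) b
        = pvMfold (pvIfil (cs.drop (cs.length - d)) pvKeyMap) b := by
  intro d
  induction d with
  | zero =>
      intro _ b
      rw [PySem.List.pyRange_one_eq_nil (by omega)]
      have h1 : cs.drop (cs.length - 0) = [] := by simp
      have h2 : pvIfil [] pvKeyMap = [] := by decide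
      rw [h1, h2]
      rfl
  | succ d ih =>
      intro hd b
      rw [show ((d + 1 : Nat) : Int) = (d : Int) + 1 from by push_cast; ring]
      have hlt : (cs.length : Int) - ((d : Int) + 1) < (cs.length : Int) := by omega
      rw [PySem.List.pyRange_one_cons hlt, List.foldl_cons]
      have hidx : ((cs.length : Int) - ((d : Int) + 1) + 1) = (cs.length : Int) - (d : Int) := by ring
      have htn : ((cs.length : Int) - ((d : Int) + 1)).toNat = cs.length - (d + 1) := by omega
      rw [hidx, htn, pvInner_eq, ih (by omega)]
      have hn : cs.length - (d + 1) < cs.length := by omega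
      have hcons := List.drop_eq_getElem_cons hn
      rw [show cs.length - (d + 1) + 1 = cs.length - d from by omega] at hcons
      rw [hcons, pvUnion, pvMfold_comm]

-- a category segment of the keyword table under the running minimum collapses to one test
theorem pvSeg (kws : List (List Char)) (k : Int) (s : List Char) (b : Int) :
    pvMfold (pvIfil s (kws.map (fun w => (w, k)))) b
      = if kws.any (fun w => decide (w <:+: s)) then min b k else b := by
  induction kws generalizing b with
  | nil => rfl
  | cons w t ih =>
      by_cases h : w <:+: s
      · simp only [List.map_cons, pvIfil, List.filter_cons, decide_eq_true h, List.any_cons,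
          Bool.true_or]
        show pvMfold (pvIfil s (t.map (fun w => (w, k)))) (min b k)
          = min b k
        rw [show pvMfold (pvIfil s (t.map (fun w => (w, k)))) (min b k)
            = if t.any (fun w => decide (w <:+: s)) then min (min b k) k else min b k from ih _]
        split <;> simp
      · simp only [List.map_cons, pvIfil, List.filter_cons, decide_eq_false h, List.any_cons,
          Bool.false_or]
        exact ih b

-- PySem.Chars.isIn as a decide over infixity
theorem pvIsIn_eq (a s : List Char) :
    PySem.Chars.isIn a s = decide (a <:+: s) := by
  rw [Bool.eq_iff_iff, PySem.Chars.isIn_iff_infix, decide_eq_true_iff]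

-- the eight-way chain over the seven match bits equals indexing by the folded minimum
theorem pvBits :
    ∀ (b0 b1 b2 b3 b4 b5 b6 : Bool),
      (if b0 then ["Where do you want to go?", "What is your budget?", "How many days will the trip be?"]
       else if b1 then ["What is your profession or role?", "How many years of experience do you have?", "What are your key skills or achievements?"]
       else if b2 then ["What technology or language should be used?", "What is the main functionality?", "Any specific requirements or constraints?"]
       else if b3 then ["What is the topic?", "Who is the target audience?", "What tone or style do you prefer?"]
       else if b4 then ["What is the business idea?", "Who is the target market?", "What is the main goal or outcome?"]
       else if b5 then ["What do you want to learn?", "What is your current level?", "What is your goal or timeline?"]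
       else if b6 then ["What type of design do you need?", "What style or theme do you prefer?", "Any specific colors or requirements?"]
       else ["What is your goal?", "Who is this for?", "Any specific requirements?"])
      = PySem.List.pyGetD pvQuestionSets
          (if b6 then min (if b5 then min (if b4 then min (if b3 then min (if b2 then min (if b1 then min (if b0 then min 7 0 else 7) 1 else (if b0 then min 7 0 else 7)) 2 else (if b1 then min (if b0 then min 7 0 else 7) 1 else (if b0 then min 7 0 else 7))) 3 else (if b2 then min (if b1 then min (if b0 then min 7 0 else 7) 1 else (if b0 then min 7 0 else 7)) 2 else (if b1 then min (if b0 then min 7 0 else 7) 1 else (if b0 then min 7 0 else 7)))) 4 else (if b3 then min (if b2 then min (if b1 then min (if b0 then min 7 0 else 7) 1 else (if b0 then min 7 0 else 7)) 2 else (if b1 then min (if b0 then min 7 0 else 7) 1 else (if b0 then min 7 0 else 7))) 3 else (if b2 then min (if b1 then min (if b0 then min 7 0 else 7) 1 else (if b0 then min 7 0 else 7)) 2 else (if b1 then min (if b0 then min 7 0 else 7) 1 else (if b0 then min 7 0 else 7))))) 5 else (if b4 then min (if b3 then min (if b2 then min (if b1 then min (if b0 then min 7 0 else 7) 1 else (if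 b0 then min 7 0 else 7)) 2 else (if b1 then min (if b0 then min 7 0 else 7) 1 else (if b0 then min 7 0 else 7))) 3 else (if b2 then min (if b1 then min (if b0 then min 7 0 else 7) 1 else (if b0 then min 7 0 else 7)) 2 else (if b1 then min (if b0 then min 7 0 else 7) 1 else (if b0 then min 7 0 else 7)))) 4 else (if b3 then min (if b2 then min (if b1 then min (if b0 then min 7 0 else 7) 1 else (if b0 then min 7 0 else 7)) 2 else (if b1 then min (if b0 then min 7 0 else 7) 1 else (if b0 then min 7 0 else 7))) 3 else (if b2 then min (if b1 then min (if b0 then min 7 0 else 7) 1 else (if b0 then min 7 0 else 7)) 2 else (if b1 then min (if b0 then min 7 0 else 7) 1 else (if b0 then min 7 0 else 7)))))) 6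
           else (if b5 then min (if b4 then min (if b3 then min (if b2 then min (if b1 then min (if b0 then min 7 0 else 7) 1 else (if b0 then min 7 0 else 7)) 2 else (if b1 then min (if b0 then min 7 0 else 7) 1 else (if b0 then min 7 0 else 7))) 3 else (if b2 then min (if b1 then min (if b0 then min 7 0 else 7) 1 else (if b0 then min 7 0 else 7)) 2 else (if b1 then min (if b0 then min 7 0 else 7) 1 else (if b0 then min 7 0 else 7)))) 4 else (if b3 then min (if b2 then min (if b1 then min (if b0 then min 7 0 else 7) 1 else (if b0 then min 7 0 else 7)) 2 else (if b1 then min (if b0 then min 7 0 else 7) 1 else (if b0 then min 7 0 else 7))) 3 else (if b2 then min (if b1 then min (if b0 then min 7 0 else 7) 1 else (if b0 then min 7 0 else 7)) 2 else (if b1 then min (if b0 then min 7 0 else 7) 1 else (if b0 then min 7 0 else 7))))) 5 else (if b4 then min (if b3 then min (if b2 then min (if b1 then min (if b0 then min 7 0 else 7) 1 else (if b0 then min 7 0 else 7)) 2 else (if b1 then min (if b0 then min 7 0 else 7) 1 else (if b0 then min 7 0 else 7))) 3 else (if b2 then min (if b1 then min (if b0 then min 7 0 else 7) 1 else (if b0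 then min 7 0 else 7)) 2 else (if b1 then min (if b0 then min 7 0 else 7) 1 else (if b0 then min 7 0 else 7)))) 4 else (if b3 then min (if b2 then min (if b1 then min (if b0 then min 7 0 else 7) 1 else (if b0 then min 7 0 else 7)) 2 else (if b1 then min (if b0 then min 7 0 else 7) 1 else (if b0 then min 7 0 else 7))) 3 else (if b2 then min (if b1 then min (if b0 then min 7 0 else 7) 1 else (if b0 then min 7 0 else 7)) 2 else (if b1 then min (if b0 then min 7 0 else 7) 1 else (if b0 then min 7 0 else 7)))))))
          [] := by
  decide

-- pvIfil / pvMfold distribute over ++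
theorem pvIfil_append (s : List Char) (l₁ l₂ : List (List Char × Int)) :
    pvIfil s (l₁ ++ l₂) = pvIfil s l₁ ++ pvIfil s l₂ := by
  simp [pvIfil, List.filter_append]

theorem pvMfold_append (l₁ l₂ : List (List Char × Int)) (b : Int) :
    pvMfold (l₁ ++ l₂) b = pvMfold l₂ (pvMfold l₁ b) := by
  simp [pvMfold, List.foldl_append]

-- the keyword table is the concatenation of its seven category segments
theorem pvKeyMap_segs :
    pvKeyMap
      = (["trip", "travel", "vacation", "tour"].map String.toList).map (fun w => (w, (0 : Int)))
        ++ (["resume", "cv", "job", "portfolio"].map String.toList).map (fun w => (w, (1 : Int)))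
        ++ (["code", "program", "api", "backend", "frontend", "app"].map String.toList).map (fun w => (w, (2 : Int)))
        ++ (["blog", "article", "post", "content", "story"].map String.toList).map (fun w => (w, (3 : Int)))
        ++ (["business", "plan", "startup", "idea"].map String.toList).map (fun w => (w, (4 : Int)))
        ++ (["study", "learn", "course", "roadmap"].map String.toList).map (fun w => (w, (5 : Int)))
        ++ (["design", "ui", "ux", "logo"].map String.toList).map (fun w => (w, (6 : Int))) := by
  decide

-- a rule's membership test in A equals the infix test over the char-list keywords
theorem pvAny_eq (ks : List String) (s : String) :
    ks.any (fun k => PySem.Str.isIn k s)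
      = (ks.map String.toList).any (fun w => decide (w <:+: s.toList)) := by
  simp only [List.any_map, PySem.Str.isIn_eq, pvIsIn_eq]
  rfl

-- B unfolded: index the table by the minimum category over infix-matching keywords
theorem pvAlt_eq (u : String) :
    get_smart_questions_alt u
      = PySem.List.pyGetD pvQuestionSets
          (pvMfold (pvIfil (PySem.Chars.lower u.toList) pvKeyMap) 7) [] := by
  have hB := pvLoop_eq (PySem.Chars.lower u.toList)
    (PySem.Chars.lower u.toList).length (le_refl _) 7
  rw [show ((((PySem.Chars.lower u.toList).length : Int))
        - (((PySem.Chars.lower u.toList).length : Nat) : Int)) = 0 from by ring,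
      Nat.sub_self, List.drop_zero] at hB
  simp only [get_smart_questions_alt]
  rw [hB]

-- ===== VERDICT (by name: the statement is the Claim_ definition above) =====
theorem get_smart_questions_spec : Claim_equal_get_smart_questions := by
  intro u _
  show get_smart_questions u = get_smart_questions_alt u
  rw [pvAlt_eq, pvKeyMap_segs]
  simp only [pvIfil_append, pvMfold_append, pvSeg]
  simp only [get_smart_questions, pvAny_eq, PySem.Str.toList_lower]
  exact pvBits _ _ _ _ _ _ _
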